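-- pv_equiv track=rewrite | github.com/ToOnlyGaurav/dockers | aerospike-multisite/scripts/cluster-visualizer.py | parse_partition_info
-- ===== SOURCE A (Python) =====
-- def parse_partition_info(raw: str) -> dict:
--     """
--     Parse the output of 'asinfo -v partition-info:namespace=...' and return
--     a dict with counts: master, replica1, replica2, absent, total_owned.
--
--     The output is semicolon-delimited records; each record has colon-delimited
--     fields. The first record is the header row. Key fields:
--       - state: S (sync/owned) or A (absent)
--       - replica: 0 (master), 1 (replica-1), 2 (replica-2), -1 (absent)
--     """
--     counts = {"master": 0, "replica1": 0, "replica2": 0, "absent": 0}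
--     if not raw:
--         return counts
--
--     records = raw.split(";")
--     if len(records) < 2:
--         return counts
--
--     # Parse header to find field indices
--     header_fields = records[0].split(":")
--     try:
--         state_idx = header_fields.index("state")
--         replica_idx = header_fields.index("replica")
--     except ValueError:
--         return counts
--
--     for rec in records[1:]:
--         fields = rec.split(":")
--         if len(fields) <= max(state_idx, replica_idx):
--             continue
--         state = fields[state_idx]
--         replica = fields[replica_idx]
--
--         if state == "S":
--             if replica == "0":
--                 counts["master"] += 1
--             elif replica == "1":
--                 counts["replica1"] += 1
--             elif replica == "2":
--                 counts["replica2"] += 1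
--         else:
--             counts["absent"] += 1
--
--     return counts
-- ===== SOURCE B (Python) =====
-- def parse_partition_info(raw: str) -> dict:
--     zero = {"master": 0, "replica1": 0, "replica2": 0, "absent": 0}
--     if not raw:
--         return zero
--     records = raw.split(";")
--     if len(records) < 2:
--         return zero
--     header_fields = records[0].split(":")
--     if "state" not in header_fields or "replica" not in header_fields:
--         return zero
--     state_idx = header_fields.index("state")
--     replica_idx = header_fields.index("replica")
--     need = max(state_idx, replica_idx)
--     tab = {}
--     for rec in records[1:]:
--         fields = rec.split(":")
--         if need < len(fields):
--             key = (fields[state_idx], fields[replica_idx])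
--             tab[key] = tab.get(key, 0) + 1
--     return {
--         "master": tab.get(("S", "0"), 0),
--         "replica1": tab.get(("S", "1"), 0),
--         "replica2": tab.get(("S", "2"), 0),
--         "absent": sum(v for (s, _), v in tab.items() if s != "S"),
--     }
-- ===== Notes on version B (the rewrite author's own statement) =====
-- stated objective: alternative
-- what changed: Instead of branching into four named counters inside the loop, B tallies each valid record's (state, replica) pair into one table in a single pass and derives master/replica1/replica2 from three lookups and absent by summing the table entries whose state is not 'S'.
import Mathlib
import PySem

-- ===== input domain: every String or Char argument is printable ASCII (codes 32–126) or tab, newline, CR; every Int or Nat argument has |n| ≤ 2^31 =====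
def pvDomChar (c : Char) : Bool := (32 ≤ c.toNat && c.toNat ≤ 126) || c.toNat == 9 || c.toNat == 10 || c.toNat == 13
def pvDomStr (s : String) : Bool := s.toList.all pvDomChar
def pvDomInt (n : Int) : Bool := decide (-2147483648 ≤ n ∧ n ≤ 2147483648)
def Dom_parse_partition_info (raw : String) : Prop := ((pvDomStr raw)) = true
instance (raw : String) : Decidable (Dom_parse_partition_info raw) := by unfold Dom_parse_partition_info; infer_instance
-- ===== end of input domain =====

-- B replaces A's four named in-loop counters by a single (state, replica) tally table
-- built in one pass, from which the four counts are derived afterwards (objective: alternative).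

-- s.split(sep) for a non-empty literal separator (PySem.Str.split? is none only for sep = "").
def pySplit (s sep : String) : List String := (PySem.Str.split? s sep).getD []

-- ===== PORT A =====
-- the body of A's for-loop
def pvStepA (si ri : Nat) (counts : PySem.Dict String Int) (rec : String) : PySem.Dict String Int :=
  let fields := pySplit rec ":"
  if fields.length ≤ max si ri then counts else
  let state := PySem.List.pyGetD fields (si : Int) ""
  let replica := PySem.List.pyGetD fields (ri : Int) ""
  if state = "S" then
    if replica = "0" then counts.modify "master" 0 (· + 1)
    else if replica = "1" then counts.modify "replica1" 0 (· + 1)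
    else if replica = "2" then counts.modify "replica2" 0 (· + 1)
    else counts
  else counts.modify "absent" 0 (· + 1)

def parse_partition_info (raw : String) : List (String × Int) :=
  let counts0 : PySem.Dict String Int :=
    PySem.Dict.ofList [("master", 0), ("replica1", 0), ("replica2", 0), ("absent", 0)]
  if raw = "" then counts0.items else
  let records : List String := pySplit raw ";"
  if records.length < 2 then counts0.items else
  let header_fields : List String := pySplit (PySem.List.pyGetD records 0 "") ":"
  match PySem.List.index? header_fields "state", PySem.List.index? header_fields "replica" with
  | some state_idx, some replica_idx =>
    ((records.drop 1).foldl (pvStepA state_idx replica_idx) counts0).items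
  | _, _ => counts0.items

-- ===== PORT B =====
-- the body of B's tallying loop
def pvStepB (si ri : Nat) (t : PySem.Dict (String × String) Int) (rec : String) : PySem.Dict (String × String) Int :=
  let fields := pySplit rec ":"
  if max si ri < fields.length then
    t.modify (PySem.List.pyGetD fields (si : Int) "", PySem.List.pyGetD fields (ri : Int) "") 0 (· + 1)
  else t

def parse_partition_info_alt (raw : String) : List (String × Int) :=
  let zero : List (String × Int) := [("master", 0), ("replica1", 0), ("replica2", 0), ("absent", 0)]
  if raw = "" then zero else
  let records : List String := pySplit raw ";"
  if records.length < 2 then zero else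
  let header_fields : List String := pySplit (PySem.List.pyGetD records 0 "") ":"
  if header_fields.contains "state" && header_fields.contains "replica" then
    let state_idx := (PySem.List.index? header_fields "state").getD 0
    let replica_idx := (PySem.List.index? header_fields "replica").getD 0
    let tab := (records.drop 1).foldl (pvStepB state_idx replica_idx) PySem.Dict.empty
    [("master", tab.getD ("S", "0") 0),
     ("replica1", tab.getD ("S", "1") 0),
     ("replica2", tab.getD ("S", "2") 0),
     ("absent", ((tab.items.filter (fun p => p.1.1 != "S")).map Prod.snd).sum)]
  else zero

-- ===== PRECONDITION & SPEC =====
def Spec_parse_partition_info (raw : String) (out : List (String × Int)) : Prop := out = parse_partition_info_alt raw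
instance (raw : String) (out : List (String × Int)) : Decidable (Spec_parse_partition_info raw out) := by unfold Spec_parse_partition_info; infer_instance

-- ===== CLAIM (what is proved, stated in full; the proofs are below) =====
def Claim_equal_parse_partition_info : Prop := ∀ (raw : String), Dom_parse_partition_info raw → Spec_parse_partition_info raw (parse_partition_info raw)

-- ===== LEMMAS AND PROOFS =====

/-- The (state, replica) key extracted from each record that passes the length guard. -/
def pvKeys (si ri : Nat) (recs : List String) : List (String × String) :=
  recs.filterMap (fun rec =>
    let fields := pySplit rec ":"
    if fields.length ≤ max si ri then none
    else some (PySem.List.pyGetD fields (si : Int) "", PySem.List.pyGetD fields (ri : Int) ""))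

lemma pvCounts0 : (PySem.Dict.ofList [("master", (0 : Int)), ("replica1", 0), ("replica2", 0), ("absent", 0)]).items
    = [("master", (0 : Int)), ("replica1", 0), ("replica2", 0), ("absent", 0)] := by decide

lemma pvCounts0' : PySem.Dict.ofList [("master", (0 : Int)), ("replica1", 0), ("replica2", 0), ("absent", 0)]
    = PySem.Dict.mk [("master", (0 : Int)), ("replica1", 0), ("replica2", 0), ("absent", 0)] := by decide

lemma pvMod_master (m r1 r2 ab : Int) :
    (PySem.Dict.mk [("master", m), ("replica1", r1), ("replica2", r2), ("absent", ab)]).modify "master" 0 (· + 1)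
    = PySem.Dict.mk [("master", m + 1), ("replica1", r1), ("replica2", r2), ("absent", ab)] := by
  simp [PySem.Dict.modify, PySem.Dict.insert, PySem.Dict.contains, PySem.Dict.getD, PySem.Dict.get?]

lemma pvMod_replica1 (m r1 r2 ab : Int) :
    (PySem.Dict.mk [("master", m), ("replica1", r1), ("replica2", r2), ("absent", ab)]).modify "replica1" 0 (· + 1)
    = PySem.Dict.mk [("master", m), ("replica1", r1 + 1), ("replica2", r2), ("absent", ab)] := by
  simp [PySem.Dict.modify, PySem.Dict.insert, PySem.Dict.contains, PySem.Dict.getD, PySem.Dict.get?]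

lemma pvMod_replica2 (m r1 r2 ab : Int) :
    (PySem.Dict.mk [("master", m), ("replica1", r1), ("replica2", r2), ("absent", ab)]).modify "replica2" 0 (· + 1)
    = PySem.Dict.mk [("master", m), ("replica1", r1), ("replica2", r2 + 1), ("absent", ab)] := by
  simp [PySem.Dict.modify, PySem.Dict.insert, PySem.Dict.contains, PySem.Dict.getD, PySem.Dict.get?]

lemma pvMod_absent (m r1 r2 ab : Int) :
    (PySem.Dict.mk [("master", m), ("replica1", r1), ("replica2", r2), ("absent", ab)]).modify "absent" 0 (· + 1)
    = PySem.Dict.mk [("master", m), ("replica1", r1), ("replica2", r2), ("absent", ab + 1)] := by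
  simp [PySem.Dict.modify, PySem.Dict.insert, PySem.Dict.contains, PySem.Dict.getD, PySem.Dict.get?]

lemma pvKeys_cons_skip (si ri : Nat) (rec : String) (recs : List String)
    (hg : (pySplit rec ":").length ≤ max si ri) :
    pvKeys si ri (rec :: recs) = pvKeys si ri recs := by
  simp only [pvKeys, List.filterMap_cons]
  rw [if_pos hg]

lemma pvKeys_cons_take (si ri : Nat) (rec : String) (recs : List String)
    (hg : ¬ (pySplit rec ":").length ≤ max si ri) :
    pvKeys si ri (rec :: recs)
    = (PySem.List.pyGetD (pySplit rec ":") (si : Int) "", PySem.List.pyGetD (pySplit rec ":") (ri : Int) "")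
        :: pvKeys si ri recs := by
  simp only [pvKeys, List.filterMap_cons]
  rw [if_neg hg]

lemma pvA_loop (si ri : Nat) :
    ∀ (recs : List String) (m r1 r2 ab : Int),
    (recs.foldl (pvStepA si ri)
      (PySem.Dict.mk [("master", m), ("replica1", r1), ("replica2", r2), ("absent", ab)])).items
    = [("master", m + ((pvKeys si ri recs).count ("S", "0") : Int)),
       ("replica1", r1 + ((pvKeys si ri recs).count ("S", "1") : Int)),
       ("replica2", r2 + ((pvKeys si ri recs).count ("S", "2") : Int)),
       ("absent", ab + ((pvKeys si ri recs).countP (fun k => k.1 != "S") : Int))]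
  | [], m, r1, r2, ab => by simp [pvKeys]
  | rec :: recs, m, r1, r2, ab => by
    rw [List.foldl_cons]
    by_cases hg : (pySplit rec ":").length ≤ max si ri
    · have hstep : pvStepA si ri
          (PySem.Dict.mk [("master", m), ("replica1", r1), ("replica2", r2), ("absent", ab)]) rec
          = PySem.Dict.mk [("master", m), ("replica1", r1), ("replica2", r2), ("absent", ab)] := by
        simp only [pvStepA]; rw [if_pos hg]
      rw [hstep, pvA_loop si ri recs m r1 r2 ab, pvKeys_cons_skip si ri rec recs hg]
    · rw [pvKeys_cons_take si ri rec recs hg]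
      by_cases hS : PySem.List.pyGetD (pySplit rec ":") (si : Int) "" = "S"
      · by_cases h0 : PySem.List.pyGetD (pySplit rec ":") (ri : Int) "" = "0"
        · have hstep : pvStepA si ri
              (PySem.Dict.mk [("master", m), ("replica1", r1), ("replica2", r2), ("absent", ab)]) rec
              = PySem.Dict.mk [("master", m + 1), ("replica1", r1), ("replica2", r2), ("absent", ab)] := by
            simp only [pvStepA]; rw [if_neg hg, if_pos hS, if_pos h0, pvMod_master]
          rw [hstep, pvA_loop si ri recs (m + 1) r1 r2 ab, hS, h0]
          simp [List.count_cons, List.countP_cons]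
          omega
        · by_cases h1 : PySem.List.pyGetD (pySplit rec ":") (ri : Int) "" = "1"
          · have hstep : pvStepA si ri
                (PySem.Dict.mk [("master", m), ("replica1", r1), ("replica2", r2), ("absent", ab)]) rec
                = PySem.Dict.mk [("master", m), ("replica1", r1 + 1), ("replica2", r2), ("absent", ab)] := by
              simp only [pvStepA]; rw [if_neg hg, if_pos hS, if_neg h0, if_pos h1, pvMod_replica1]
            rw [hstep, pvA_loop si ri recs m (r1 + 1) r2 ab, hS, h1]
            simp [List.count_cons, List.countP_cons]
            omega
          · by_cases h2 : PySem.List.pyGetD (pySplit rec ":") (ri : Int) "" = "2"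
            · have hstep : pvStepA si ri
                  (PySem.Dict.mk [("master", m), ("replica1", r1), ("replica2", r2), ("absent", ab)]) rec
                  = PySem.Dict.mk [("master", m), ("replica1", r1), ("replica2", r2 + 1), ("absent", ab)] := by
                simp only [pvStepA]; rw [if_neg hg, if_pos hS, if_neg h0, if_neg h1, if_pos h2, pvMod_replica2]
              rw [hstep, pvA_loop si ri recs m r1 (r2 + 1) ab, hS, h2]
              simp [List.count_cons, List.countP_cons]
              omega
            · have hstep : pvStepA si ri
                  (PySem.Dict.mk [("master", m), ("replica1", r1), ("replica2", r2), ("absent", ab)]) rec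
                  = PySem.Dict.mk [("master", m), ("replica1", r1), ("replica2", r2), ("absent", ab)] := by
                simp only [pvStepA]; rw [if_neg hg, if_pos hS, if_neg h0, if_neg h1, if_neg h2]
              rw [hstep, pvA_loop si ri recs m r1 r2 ab, hS]
              generalize hrp : PySem.List.pyGetD (pySplit rec ":") (ri : Int) "" = rp at h0 h1 h2 ⊢
              simp [List.count_cons, List.countP_cons, h0, h1, h2, Ne.symm h0, Ne.symm h1, Ne.symm h2]
      · have hstep : pvStepA si ri
            (PySem.Dict.mk [("master", m), ("replica1", r1), ("replica2", r2), ("absent", ab)]) rec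
            = PySem.Dict.mk [("master", m), ("replica1", r1), ("replica2", r2), ("absent", ab + 1)] := by
          simp only [pvStepA]; rw [if_neg hg, if_neg hS, pvMod_absent]
        rw [hstep, pvA_loop si ri recs m r1 r2 (ab + 1)]
        generalize hst : PySem.List.pyGetD (pySplit rec ":") (si : Int) "" = st at hS ⊢
        simp [List.count_cons, List.countP_cons, hS, Ne.symm hS]
        omega

lemma pvB_loop (si ri : Nat) :
    ∀ (recs : List String) (t : PySem.Dict (String × String) Int),
    recs.foldl (pvStepB si ri) t
    = (pvKeys si ri recs).foldl (fun d x => d.modify x 0 (· + 1)) t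
  | [], t => by simp [pvKeys]
  | rec :: recs, t => by
    rw [List.foldl_cons]
    by_cases hg : (pySplit rec ":").length ≤ max si ri
    · have hstep : pvStepB si ri t rec = t := by
        simp only [pvStepB]
        rw [if_neg (by omega : ¬ max si ri < (pySplit rec ":").length)]
      rw [hstep, pvB_loop si ri recs t, pvKeys_cons_skip si ri rec recs hg]
    · rw [pvKeys_cons_take si ri rec recs hg, List.foldl_cons]
      have hstep : pvStepB si ri t rec
          = t.modify (PySem.List.pyGetD (pySplit rec ":") (si : Int) "",
                      PySem.List.pyGetD (pySplit rec ":") (ri : Int) "") 0 (· + 1) := by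
        simp only [pvStepB]
        rw [if_pos (by omega : max si ri < (pySplit rec ":").length)]
      rw [hstep, pvB_loop si ri recs _]

lemma pv_indicator_sum {α : Type} [DecidableEq α] (x : α) :
    ∀ l : List α, l.Nodup → (l.map (fun k => if x = k then (1 : Int) else 0)).sum = if x ∈ l then 1 else 0
  | [], _ => by simp
  | a :: l, h => by
    rw [List.map_cons, List.sum_cons, pv_indicator_sum x l (List.nodup_cons.mp h).2]
    by_cases hxa : x = a
    · subst hxa
      have hxl : x ∉ l := (List.nodup_cons.mp h).1
      simp [hxl]
    · simp [hxa]

lemma pv_sum_count_filter (p : String × String → Bool) (ks : List (String × String)) (hnd : ks.Nodup) :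
    ∀ xs : List (String × String), (∀ x ∈ xs, x ∈ ks) →
    (((ks.filter p).map (fun k => (xs.count k : Int))).sum) = (xs.countP p : Int)
  | [], _ => by simp
  | x :: xs, hmem => by
    have hx : x ∈ ks := hmem x (List.mem_cons_self)
    have hmem' : ∀ y ∈ xs, y ∈ ks := fun y hy => hmem y (List.mem_cons_of_mem x hy)
    have hcount : ∀ k, (((x :: xs).count k : Int)) = (xs.count k : Int) + (if x = k then 1 else 0) := by
      intro k
      by_cases hk : x = k
      · simp [hk]
      · simp [hk]
    calc ((ks.filter p).map (fun k => (((x :: xs).count k : Nat) : Int))).sum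
        = ((ks.filter p).map (fun k => (xs.count k : Int) + (if x = k then 1 else 0))).sum := by
          refine congrArg List.sum (List.map_congr_left ?_); intro k _; exact hcount k
      _ = ((ks.filter p).map (fun k => (xs.count k : Int))).sum
            + ((ks.filter p).map (fun k => if x = k then (1 : Int) else 0)).sum := by
          rw [PySem.List.sum_map_add_int]
      _ = (xs.countP p : Int) + (if p x then 1 else 0) := by
          rw [pv_sum_count_filter p ks hnd xs hmem']
          rw [pv_indicator_sum x (ks.filter p) (hnd.filter p)]
          simp [List.mem_filter, hx]
      _ = ((x :: xs).countP p : Int) := by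
          rw [List.countP_cons]
          by_cases hp : p x = true <;> simp [hp]

lemma pv_absent (xs : List (String × String)) :
    ((((PySem.Dict.counter xs).items.filter (fun p => p.1.1 != "S")).map Prod.snd).sum)
    = (xs.countP (fun k => k.1 != "S") : Int) := by
  rw [PySem.Dict.items_counter, List.filter_map, List.map_map]
  have h1 : (PySem.Set.ofList xs).Nodup := PySem.Set.nodup_ofList xs
  have h2 : ∀ x ∈ xs, x ∈ PySem.Set.ofList xs := fun x hx => (PySem.Set.mem_ofList xs x).mpr hx
  simpa [Function.comp] using pv_sum_count_filter (fun k => k.1 != "S") (PySem.Set.ofList xs) h1 xs h2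

theorem pv_main (raw : String) : parse_partition_info raw = parse_partition_info_alt raw := by
  unfold parse_partition_info parse_partition_info_alt
  by_cases h0 : raw = ""
  · simp [h0, pvCounts0]
  · rw [if_neg h0, if_neg h0]
    by_cases h1 : (pySplit raw ";").length < 2
    · rw [if_pos h1, if_pos h1, pvCounts0]
    · rw [if_neg h1, if_neg h1]
      cases hs : PySem.List.index? (pySplit (PySem.List.pyGetD (pySplit raw ";") 0 "") ":") "state" with
      | none =>
        have hns : "state" ∉ pySplit (PySem.List.pyGetD (pySplit raw ";") 0 "") ":" :=
          (PySem.List.index?_eq_none_iff _ _).mp hs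
        simp only [PySem.List.index?_eq_idxOf?] at hs
        cases hr : List.idxOf? "replica" (pySplit (PySem.List.pyGetD (pySplit raw ";") 0 "") ":") <;>
          simp [hs, hr, hns, pvCounts0]
      | some si =>
        cases hr : PySem.List.index? (pySplit (PySem.List.pyGetD (pySplit raw ";") 0 "") ":") "replica" with
        | none =>
          have hnr : "replica" ∉ pySplit (PySem.List.pyGetD (pySplit raw ";") 0 "") ":" :=
            (PySem.List.index?_eq_none_iff _ _).mp hr
          simp only [PySem.List.index?_eq_idxOf?] at hs hr
          simp [hs, hr, hnr, pvCounts0]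
        | some ri =>
          have hms : "state" ∈ pySplit (PySem.List.pyGetD (pySplit raw ";") 0 "") ":" :=
            (PySem.List.index?_isSome_iff _ _).mp (by rw [hs]; rfl)
          have hmr : "replica" ∈ pySplit (PySem.List.pyGetD (pySplit raw ";") 0 "") ":" :=
            (PySem.List.index?_isSome_iff _ _).mp (by rw [hr]; rfl)
          simp only [PySem.List.index?_eq_idxOf?] at hs hr
          simp only [hs, hr, pvCounts0', PySem.List.index?_eq_idxOf?, Option.getD_some]
          rw [if_pos (by simp [hms, hmr])]
          rw [pvA_loop si ri _ 0 0 0 0]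
          have htab : ((pySplit raw ";").drop 1).foldl (pvStepB si ri) PySem.Dict.empty
              = PySem.Dict.counter (pvKeys si ri ((pySplit raw ";").drop 1)) := by
            rw [pvB_loop si ri _ PySem.Dict.empty, PySem.Dict.counter_eq_foldl]
          rw [htab, PySem.Dict.getD_counter, PySem.Dict.getD_counter, PySem.Dict.getD_counter, pv_absent]
          simp

-- ===== VERDICT (by name: the statement is the Claim_ definition above) =====
theorem parse_partition_info_spec : Claim_equal_parse_partition_info := by
  intro raw _
  exact pv_main raw
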